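-- pv_equiv track=rewrite | github.com/BradHawthorne/ult3edit | conversions/tools/tile_compiler.py | _byte_to_row
-- ===== SOURCE A (Python) =====
-- GLYPH_WIDTH = 7      # 7 visible pixels per row (bits 0-6)
--
-- def _byte_to_row(byte_val):
--     """Convert a single glyph byte to a 7-character text row."""
--     chars = []
--     for c in range(GLYPH_WIDTH):
--         if byte_val & (1 << c):
--             chars.append('#')
--         else:
--             chars.append('.')
--     return ''.join(chars)
-- ===== SOURCE B (Python) =====
-- GLYPH_WIDTH = 7
--
-- def _byte_to_row(byte_val):
--     """Convert a single glyph byte to a 7-character text row."""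
--     n = byte_val & 0x7F
--     return format(n, '07b')[::-1].translate(str.maketrans('01', '.#'))
-- ===== Notes on version B (the rewrite author's own statement) =====
-- stated objective: idiomatic
-- what changed: Replaces the per-bit test-and-append loop with a mask (& 0x7F) followed by format(n,'07b'), a slice reversal to LSB-first order, and a str.translate of the binary digits to '.'/'#'.
import Mathlib
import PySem

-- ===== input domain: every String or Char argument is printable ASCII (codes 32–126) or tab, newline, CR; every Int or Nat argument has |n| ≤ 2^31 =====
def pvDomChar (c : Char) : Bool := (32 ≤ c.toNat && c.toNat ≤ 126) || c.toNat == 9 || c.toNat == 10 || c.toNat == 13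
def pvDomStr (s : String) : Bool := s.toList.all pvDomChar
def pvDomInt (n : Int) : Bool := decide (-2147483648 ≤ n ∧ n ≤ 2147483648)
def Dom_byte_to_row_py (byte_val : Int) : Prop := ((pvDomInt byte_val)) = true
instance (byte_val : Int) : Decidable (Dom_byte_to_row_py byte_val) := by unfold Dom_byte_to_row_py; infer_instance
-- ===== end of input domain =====

-- B replaces A's per-bit test-and-append loop with mask & 0x7F, format(n,'07b'), [::-1] and a digit translation.

-- ===== PORT A =====
-- for c in range(GLYPH_WIDTH): chars.append('#' if byte_val & (1 << c) else '.'); ''.join(chars)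
-- (c drawn from pyRange 0 7 1 is nonnegative, so 1 << c is (1 : Int) <<< c.toNat exactly)
def byte_to_row_py (byte_val : Int) : String :=
  let chars : List Char := (PySem.List.pyRange 0 7 1).foldl
    (fun acc c => if PySem.Int.band byte_val ((1 : Int) <<< c.toNat) ≠ 0
                  then acc ++ ['#'] else acc ++ ['.']) []
  String.mk chars

-- ===== PORT B =====
def byte_to_row_py_alt (byte_val : Int) : String :=
  let n : Int := PySem.Int.band byte_val 127                                -- byte_val & 0x7F
  -- format(n, '07b'): 7 binary digits, MSB first (exact here since 0 ≤ n < 128)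
  let s : List Char := (List.range 7).map (fun i => if n.toNat.testBit (6 - i) then '1' else '0')
  let r : List Char := s.reverse                                             -- [::-1]
  String.mk (r.map (fun ch => if ch = '1' then '#' else '.'))                -- translate('01' -> '.#')

-- ===== PRECONDITION & SPEC =====
def Spec_byte_to_row_py (byte_val : Int) (out : String) : Prop := out = byte_to_row_py_alt byte_val
instance (byte_val : Int) (out : String) : Decidable (Spec_byte_to_row_py byte_val out) := by unfold Spec_byte_to_row_py; infer_instance

-- ===== CLAIM (what is proved, stated in full; the proofs are below) =====
def Claim_equal_byte_to_row_py : Prop := ∀ (byte_val : Int), Dom_byte_to_row_py byte_val → Spec_byte_to_row_py byte_val (byte_to_row_py byte_val)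

-- ===== LEMMAS AND PROOFS =====

-- bits ≥ 7 of a mask < 128 are dead: &&& only sees the argument mod 128
theorem pv_land_mod (a m : Nat) (hm : m < 128) : a &&& m = (a % 128) &&& m := by
  apply Nat.eq_of_testBit_eq
  intro i
  simp only [Nat.testBit_and]
  rcases lt_or_ge i 7 with h | h
  · rw [show (128 : Nat) = 2 ^ 7 from rfl, Nat.testBit_mod_two_pow]
    simp [h]
  · have : m.testBit i = false := Nat.testBit_eq_false_of_lt (lt_of_lt_of_le hm (by
      calc (128 : Nat) = 2 ^ 7 := rfl
        _ ≤ 2 ^ i := Nat.pow_le_pow_right (by norm_num) h))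
    simp [this]

-- two's-complement key fact, finite check
set_option maxHeartbeats 2000000 in
set_option maxRecDepth 10000 in
theorem pv_compl_and : ∀ m t : Fin 128, (127 - t.val) &&& m.val = m.val - (m.val &&& t.val) := by decide

-- Python's  n & m  for a mask m < 128 only depends on n mod 128
theorem pv_band_mask (n : Int) (m : Nat) (hm : m < 128) :
    PySem.Int.band n (m : Int) = PySem.Int.band (n % 128) (m : Int) := by
  have hr0 : 0 ≤ n % 128 := by omega
  have hrlt : n % 128 < 128 := by omega
  rcases le_or_gt 0 n with h | h
  · have h1 : (n % 128).toNat = n.toNat % 128 := by omega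
    simp only [PySem.Int.band, if_pos h, if_pos hr0, if_pos (Int.natCast_nonneg m),
      Int.toNat_natCast, h1]
    rw [pv_land_mod n.toNat m hm]
  · have hneg : ¬ (0 ≤ n) := not_le.mpr h
    have hr : (n % 128).toNat = 127 - ((-n - 1).toNat % 128) := by omega
    simp only [PySem.Int.band, if_neg hneg, if_pos hr0, if_pos (Int.natCast_nonneg m),
      Int.toNat_natCast, hr]
    have h2 : m &&& (-n - 1).toNat = m &&& ((-n - 1).toNat % 128) := by
      rw [Nat.and_comm, pv_land_mod _ m hm, Nat.and_comm]
    rw [h2]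
    exact_mod_cast (pv_compl_and ⟨m, hm⟩ ⟨(-n - 1).toNat % 128, Nat.mod_lt _ (by norm_num)⟩).symm

-- Python's  n & 0x7F  is  n mod 128
theorem pv_band127 (n : Int) : PySem.Int.band n 127 = n % 128 := by
  have := pv_band_mask n 127 (by norm_num)
  rw [show ((127 : Nat) : Int) = 127 from rfl] at this
  rw [this]
  have h0 : 0 ≤ n % 128 := by omega
  have h1 : n % 128 < 128 := by omega
  simp only [PySem.Int.band, if_pos h0, if_pos (by norm_num : (0:Int) ≤ 127)]
  have : (n % 128).toNat &&& (127 : Int).toNat = (n % 128).toNat := by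
    have := Nat.and_two_pow_sub_one_eq_mod (n % 128).toNat 7
    simpa [Nat.mod_eq_of_lt (by omega : (n % 128).toNat < 128)] using this
  rw [this]; omega

theorem pv_A_mod (n : Int) : byte_to_row_py n = byte_to_row_py (n % 128) := by
  simp only [byte_to_row_py, show PySem.List.pyRange 0 7 1 = [0,1,2,3,4,5,6] from rfl,
    List.foldl]
  rw [show ((1:Int) <<< ((Int.toNat (0:Int) : Nat) : Int)) = ((1 : Nat) : Int) from by decide,
      show ((1:Int) <<< ((Int.toNat (1:Int) : Nat) : Int)) = ((2 : Nat) : Int) from by decide,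
      show ((1:Int) <<< ((Int.toNat (2:Int) : Nat) : Int)) = ((4 : Nat) : Int) from by decide,
      show ((1:Int) <<< ((Int.toNat (3:Int) : Nat) : Int)) = ((8 : Nat) : Int) from by decide,
      show ((1:Int) <<< ((Int.toNat (4:Int) : Nat) : Int)) = ((16 : Nat) : Int) from by decide,
      show ((1:Int) <<< ((Int.toNat (5:Int) : Nat) : Int)) = ((32 : Nat) : Int) from by decide,
      show ((1:Int) <<< ((Int.toNat (6:Int) : Nat) : Int)) = ((64 : Nat) : Int) from by decide,
      pv_band_mask n 1 (by norm_num), pv_band_mask n 2 (by norm_num),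
      pv_band_mask n 4 (by norm_num), pv_band_mask n 8 (by norm_num),
      pv_band_mask n 16 (by norm_num), pv_band_mask n 32 (by norm_num),
      pv_band_mask n 64 (by norm_num)]

theorem pv_B_mod (n : Int) : byte_to_row_py_alt n = byte_to_row_py_alt (n % 128) := by
  simp only [byte_to_row_py_alt, pv_band127, Int.emod_emod_of_dvd n (dvd_refl (128:Int))]

set_option maxHeartbeats 2000000 in
set_option maxRecDepth 10000 in
theorem pv_fin : ∀ r : Fin 128, byte_to_row_py (r.val : Int) = byte_to_row_py_alt (r.val : Int) := by
  decide

-- ===== VERDICT (by name: the statement is the Claim_ definition above) =====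
theorem byte_to_row_py_spec : Claim_equal_byte_to_row_py := by
  intro n _
  unfold Spec_byte_to_row_py
  rw [pv_A_mod n, pv_B_mod n]
  have h : n % 128 = (((n % 128).toNat : Nat) : Int) := by omega
  rw [h]
  exact pv_fin ⟨(n % 128).toNat, by omega⟩
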